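-- pv_equiv track=rewrite | github.com/deepweather/arxiv-radar | backend/app/services/fulltext.py | _find_main_tex
-- ===== SOURCE A (Python) =====
-- def _find_main_tex(tex_files: dict[str, str]) -> str | None:
--     """Find the main .tex file containing \\begin{document}."""
--     for name, content in tex_files.items():
--         if "\\begin{document}" in content:
--             return name
--
--     candidates = [n for n in tex_files if n.lower() in ("main.tex", "paper.tex", "manuscript.tex")]
--     if candidates:
--         return candidates[0]
--
--     if tex_files:
--         return max(tex_files, key=lambda n: len(tex_files[n]))
--     return None
-- ===== SOURCE B (Python) =====
-- def _find_main_tex(tex_files: dict[str, str]) -> str | None: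
--     """Single merged pass: track first file with \\begin{document}, first
--     conventionally-named file, and the longest file, then pick in that order."""
--     first_doc = None
--     first_named = None
--     best = None
--     best_len = -1
--     for name, content in tex_files.items():
--         if first_doc is None and "\\begin{document}" in content:
--             first_doc = name
--         if first_named is None and name.lower() in ("main.tex", "paper.tex", "manuscript.tex"):
--             first_named = name
--         if len(content) > best_len:
--             best = name
--             best_len = len(content)
--     if first_doc is not None:
--         return first_doc
--     if first_named is not None:
--         return first_named
--     return best
-- ===== Notes on version B (the rewrite author's own statement) =====
-- stated objective: alternative
-- what changed: Replaced A's three separate traversals (early-return scan for \begin{document}, candidate-list build, max-by-length with a dict lookup per key) by one merged pass maintaining first_doc / first_named / best-length accumulators, combined after the loop.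
import Mathlib
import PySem

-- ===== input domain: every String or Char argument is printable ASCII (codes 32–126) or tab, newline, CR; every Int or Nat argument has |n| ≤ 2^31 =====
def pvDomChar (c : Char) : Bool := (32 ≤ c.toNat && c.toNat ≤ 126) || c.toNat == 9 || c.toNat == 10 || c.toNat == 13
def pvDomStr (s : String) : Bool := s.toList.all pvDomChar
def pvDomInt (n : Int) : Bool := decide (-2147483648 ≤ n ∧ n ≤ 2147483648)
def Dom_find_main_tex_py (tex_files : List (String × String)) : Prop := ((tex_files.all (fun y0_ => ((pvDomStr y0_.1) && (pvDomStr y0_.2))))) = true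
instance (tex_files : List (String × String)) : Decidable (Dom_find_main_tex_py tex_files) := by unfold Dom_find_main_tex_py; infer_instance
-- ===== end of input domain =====

-- B merges A's three traversals (doc scan, candidate list, max-by-length) into one pass; alternative decomposition, same result.

-- ===== PORT A =====
def pvHasDoc (c : String) : Bool := PySem.Str.isIn "\\begin{document}" c

def pvIsMain (n : String) : Bool :=
  PySem.Str.lower n == "main.tex" || PySem.Str.lower n == "paper.tex" || PySem.Str.lower n == "manuscript.tex"

-- the 'for name, content in tex_files.items(): if "\begin{document}" in content: return name' loop
def pvALoop : List (String × String) → Option String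
  | [] => none
  | (n, c) :: rest => if pvHasDoc c then some n else pvALoop rest

def find_main_tex_py (tex_files : List (String × String)) : Option String :=
  match pvALoop tex_files with
  | some n => some n
  | none =>
    let candidates := (tex_files.map Prod.fst).filter pvIsMain
    if candidates ≠ [] then candidates.head?
    else if tex_files ≠ [] then
      -- max(tex_files, key=lambda n: len(tex_files[n])); the "" default is unreachable (n is always a key)
      PySem.List.max? (tex_files.map Prod.fst)
        (fun n => PySem.Str.len (PySem.Dict.getD (PySem.Dict.mk tex_files) n ""))
    else none

-- ===== PORT B =====
def pvBStep (st : Option String × Option String × Option String × Int) (p : String × String) :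
    Option String × Option String × Option String × Int :=
  (if st.1.isNone && pvHasDoc p.2 then some p.1 else st.1,
   if st.2.1.isNone && pvIsMain p.1 then some p.1 else st.2.1,
   if st.2.2.2 < PySem.Str.len p.2 then some p.1 else st.2.2.1,
   if st.2.2.2 < PySem.Str.len p.2 then PySem.Str.len p.2 else st.2.2.2)

def find_main_tex_py_alt (tex_files : List (String × String)) : Option String :=
  match tex_files.foldl pvBStep (none, none, none, -1) with
  | (some n, _, _, _) => some n
  | (none, some n, _, _) => some n
  | (none, none, best, _) => best

-- ===== PRECONDITION & SPEC =====
-- Pre_ restricts to association lists with pairwise-distinct keys: the faithful representation of a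
-- Python dict (A's parameter type), where tex_files[n] is the content stored with n.
def Pre_find_main_tex_py (tex_files : List (String × String)) : Prop :=
  (tex_files.map Prod.fst).Nodup
instance (tex_files : List (String × String)) : Decidable (Pre_find_main_tex_py tex_files) := by unfold Pre_find_main_tex_py; infer_instance

def pvWitness_find_main_tex_py : (List (String × String)) := [("main.tex", "x"), ("b.tex", "yy")]

def Spec_find_main_tex_py (tex_files : List (String × String)) (out : Option String) : Prop := out = find_main_tex_py_alt tex_files
instance (tex_files : List (String × String)) (out : Option String) : Decidable (Spec_find_main_tex_py tex_files out) := by unfold Spec_find_main_tex_py; infer_instance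

-- ===== CLAIM (what is proved, stated in full; the proofs are below) =====
def Claim_equal_find_main_tex_py : Prop := ∀ (tex_files : List (String × String)), Dom_find_main_tex_py tex_files → Pre_find_main_tex_py tex_files → Spec_find_main_tex_py tex_files (find_main_tex_py tex_files)

-- ===== LEMMAS AND PROOFS =====

-- the three independent components of B's merged loop
def pvFdStep (fd : Option String) (p : String × String) : Option String :=
  if fd.isNone && pvHasDoc p.2 then some p.1 else fd

def pvFnStep (fn : Option String) (p : String × String) : Option String :=
  if fn.isNone && pvIsMain p.1 then some p.1 else fn

def pvBBStep (b : Option String × Int) (p : String × String) : Option String × Int :=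
  if b.2 < PySem.Str.len p.2 then (some p.1, PySem.Str.len p.2) else b

-- first pair maximizing content length (strict-greater update, so first maximum wins)
def pvPairMax (m : String × String) (tf : List (String × String)) : String × String :=
  tf.foldl (fun a x => if PySem.Str.len a.2 < PySem.Str.len x.2 then x else a) m

theorem pv_split (tf : List (String × String)) (fd fn : Option String) (b : Option String × Int) :
    tf.foldl pvBStep (fd, fn, b.1, b.2)
      = (tf.foldl pvFdStep fd, tf.foldl pvFnStep fn,
         (tf.foldl pvBBStep b).1, (tf.foldl pvBBStep b).2) := by
  induction tf generalizing fd fn b with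
  | nil => rfl
  | cons p rest ih =>
    have hstep : pvBStep (fd, fn, b.1, b.2) p
        = (pvFdStep fd p, pvFnStep fn p, (pvBBStep b p).1, (pvBBStep b p).2) := by
      simp only [pvBStep, pvFdStep, pvFnStep, pvBBStep]
      split_ifs <;> rfl
    simp only [List.foldl, hstep]
    exact ih _ _ _

theorem pv_fd_some (tf : List (String × String)) (x : String) :
    tf.foldl pvFdStep (some x) = some x := by
  induction tf with
  | nil => rfl
  | cons p rest ih => simpa [pvFdStep] using ih

theorem pv_fd_none (tf : List (String × String)) :
    tf.foldl pvFdStep none = pvALoop tf := by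
  induction tf with
  | nil => rfl
  | cons p rest ih =>
    by_cases h : pvHasDoc p.2
    · simp [pvFdStep, pvALoop, h, pv_fd_some]
    · simpa [pvFdStep, pvALoop, h] using ih

theorem pv_fn_some (tf : List (String × String)) (x : String) :
    tf.foldl pvFnStep (some x) = some x := by
  induction tf with
  | nil => rfl
  | cons p rest ih => simpa [pvFnStep] using ih

theorem pv_fn_none (tf : List (String × String)) :
    tf.foldl pvFnStep none = ((tf.map Prod.fst).filter pvIsMain).head? := by
  induction tf with
  | nil => rfl
  | cons p rest ih =>
    by_cases h : pvIsMain p.1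
    · simp [pvFnStep, h, pv_fn_some]
    · simpa [pvFnStep, h] using ih

theorem pv_len_nonneg (s : String) : 0 ≤ PySem.Str.len s := by
  simp [PySem.Str.len_eq]

theorem pv_bb_some (tf : List (String × String)) (m : String × String) :
    tf.foldl pvBBStep (some m.1, PySem.Str.len m.2)
      = (some (pvPairMax m tf).1, PySem.Str.len (pvPairMax m tf).2) := by
  induction tf generalizing m with
  | nil => rfl
  | cons x rest ih =>
    have hstep : pvBBStep (some m.1, PySem.Str.len m.2) x
        = (some (if PySem.Str.len m.2 < PySem.Str.len x.2 then x else m).1,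
           PySem.Str.len (if PySem.Str.len m.2 < PySem.Str.len x.2 then x else m).2) := by
      by_cases h : m.2.length < x.2.length <;> simp [pvBBStep, PySem.Str.len_eq, h]
    have hpm : pvPairMax m (x :: rest)
        = pvPairMax (if PySem.Str.len m.2 < PySem.Str.len x.2 then x else m) rest := by
      simp only [pvPairMax, List.foldl_cons]
    rw [List.foldl_cons, hstep, ih, hpm]

theorem pv_bb_none (p : String × String) (rest : List (String × String)) :
    (p :: rest).foldl pvBBStep (none, -1)
      = (some (pvPairMax p rest).1, PySem.Str.len (pvPairMax p rest).2) := by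
  have h0 : (-1 : Int) < PySem.Str.len p.2 := lt_of_lt_of_le (by norm_num) (pv_len_nonneg p.2)
  simpa [List.foldl, pvBBStep, h0] using pv_bb_some rest p

theorem pv_max?_cons (x : String) (xs : List String) (key : String → Int) :
    PySem.List.max? (x :: xs) key
      = some (xs.foldl (fun a y => if key a < key y then y else a) x) := by
  induction xs generalizing x with
  | nil => rfl
  | cons y rest ih =>
    have hstep : PySem.List.max? (x :: y :: rest) key
        = PySem.List.max? ((if key x < key y then y else x) :: rest) key := by
      by_cases h : key x < key y <;>
        · show List.foldl _ _ _ = List.foldl _ _ _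
          simp only [List.foldl_cons]
          congr 1
          simp [h]
    rw [hstep, ih, List.foldl_cons]

-- under a key-agreement hypothesis, A's name-fold computes the name of B's pair-fold
theorem pv_namefold_eq (key : String → Int) (tf : List (String × String)) (m : String × String)
    (h : ∀ x ∈ tf, key x.1 = PySem.Str.len x.2) (hm : key m.1 = PySem.Str.len m.2) :
    tf.foldl (fun a x => if key a < key x.1 then x.1 else a) m.1 = (pvPairMax m tf).1 := by
  induction tf generalizing m with
  | nil => rfl
  | cons x rest ih =>
    have hx : key x.1 = PySem.Str.len x.2 := h x (by simp)
    have hrest : ∀ y ∈ rest, key y.1 = PySem.Str.len y.2 := fun y hy => h y (by simp [hy])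
    have hstep : (if key m.1 < key x.1 then x.1 else m.1)
        = (if PySem.Str.len m.2 < PySem.Str.len x.2 then x else m).1 := by
      rw [hm, hx]
      split_ifs <;> rfl
    have hpm : pvPairMax m (x :: rest)
        = pvPairMax (if PySem.Str.len m.2 < PySem.Str.len x.2 then x else m) rest := by
      simp only [pvPairMax, List.foldl_cons]
    have hm' : key (if PySem.Str.len m.2 < PySem.Str.len x.2 then x else m).1
        = PySem.Str.len (if PySem.Str.len m.2 < PySem.Str.len x.2 then x else m).2 := by
      by_cases hlt : PySem.Str.len m.2 < PySem.Str.len x.2 <;> simp only [hlt, if_true, if_false, hx, hm]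
    rw [List.foldl_cons, hstep, hpm]
    exact ih _ hrest hm'

theorem pv_getD_mk (tf : List (String × String)) (n c : String)
    (hnd : (tf.map Prod.fst).Nodup) (hmem : (n, c) ∈ tf) :
    PySem.Dict.getD (PySem.Dict.mk tf) n "" = c := by
  induction tf with
  | nil => cases hmem
  | cons q rest ih =>
    obtain ⟨k, v⟩ := q
    rcases List.mem_cons.mp hmem with h | h
    · cases h
      simp [PySem.Dict.getD, PySem.Dict.get?_mk_cons]
    · have hne : (k == n) = false := by
        simp only [beq_eq_false_iff_ne, ne_eq]
        intro he
        have : n ∈ rest.map Prod.fst := List.mem_map.mpr ⟨(n, c), h, rfl⟩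
        exact (List.nodup_cons.mp (by simpa using hnd)).1 (he ▸ this)
      have hrest := ih (List.nodup_cons.mp (by simpa using hnd)).2 h
      simpa [PySem.Dict.getD, PySem.Dict.get?_mk_cons, hne] using hrest

theorem pv_alt_eq (tf : List (String × String)) :
    find_main_tex_py_alt tf
      = ((pvALoop tf).or (((tf.map Prod.fst).filter pvIsMain).head?)).or
          ((tf.foldl pvBBStep (none, -1)).1) := by
  have h := pv_split tf none none (none, -1)
  unfold find_main_tex_py_alt
  rw [show ((none : Option String), (none : Option String), (none : Option String), (-1 : Int))
        = ((none : Option String), (none : Option String), ((none : Option String), (-1 : Int)).1,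
           ((none : Option String), (-1 : Int)).2) from rfl, h,
      pv_fd_none, pv_fn_none]
  cases pvALoop tf <;> cases ((tf.map Prod.fst).filter pvIsMain).head? <;> rfl

-- ===== VERDICT (by name: the statement is the Claim_ definition above) =====
theorem find_main_tex_py_spec : Claim_equal_find_main_tex_py := by
  intro tf _ hPre
  unfold Spec_find_main_tex_py
  rw [pv_alt_eq]
  unfold find_main_tex_py
  cases tf with
  | nil => rfl
  | cons p rest =>
    cases hA : pvALoop (p :: rest) with
    | some n => rfl
    | none =>
      cases hh : (((p :: rest).map Prod.fst).filter pvIsMain) with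
      | cons c cs => simp
      | nil =>
        rw [if_neg (by simp), if_pos (by simp)]
        have hkeys : ∀ x ∈ p :: rest,
            PySem.Str.len (PySem.Dict.getD (PySem.Dict.mk (p :: rest)) x.1 "") = PySem.Str.len x.2 := by
          intro x hx
          rw [pv_getD_mk (p :: rest) x.1 x.2 hPre hx]
        rw [List.map_cons, pv_max?_cons, List.foldl_map,
            pv_namefold_eq _ rest p (fun y hy => hkeys y (by simp [hy])) (hkeys p (by simp)),
            pv_bb_none]
        rfl
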